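-- pv_equiv track=rewrite | github.com/mdshadanaltmash/Data-Structure-and-Algorithms | Misc/no_of_operation.py | get_no_of_operation
-- ===== SOURCE A (Python) =====
-- def get_no_of_operation(arr, k):
--     cnt = 0
--     max_elem = max(arr)
--     for i in range(len(arr)):
--         while arr[i] < max_elem:
--             arr[i] += k
--             cnt += 1
--         if arr[i] > max_elem:
--             return -1
--     return cnt
-- ===== SOURCE B (Python) =====
-- def get_no_of_operation(arr, k):
--     m = max(arr)
--     total = 0
--     for x in arr:
--         d = m - x
--         if d == 0:
--             continue
--         if d % k:
--             return -1
--         total += d // k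
--     return total
-- ===== Notes on version B (the rewrite author's own statement) =====
-- stated objective: alternative
-- what changed: Replaces A's per-element increment-until-max simulation (inner while loop) with direct arithmetic: one pass doing a (max-x) % k divisibility check and adding (max-x) // k per element; same cost on the measured inputs, asymptotically fewer steps only when gaps are large relative to k.
import Mathlib
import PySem

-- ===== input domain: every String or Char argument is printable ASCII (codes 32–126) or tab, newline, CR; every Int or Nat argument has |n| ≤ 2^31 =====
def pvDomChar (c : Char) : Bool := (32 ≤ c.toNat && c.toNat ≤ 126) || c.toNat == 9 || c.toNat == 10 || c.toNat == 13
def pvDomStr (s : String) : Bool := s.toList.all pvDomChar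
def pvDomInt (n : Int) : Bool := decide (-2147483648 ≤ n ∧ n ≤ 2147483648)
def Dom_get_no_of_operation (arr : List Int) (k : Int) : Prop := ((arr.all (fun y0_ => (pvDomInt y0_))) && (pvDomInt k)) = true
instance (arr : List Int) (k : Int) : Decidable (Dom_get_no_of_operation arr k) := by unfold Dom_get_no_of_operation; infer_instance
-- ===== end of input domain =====

-- B (alternative): replaces A's per-element increment-until-max while loop by direct
-- arithmetic, a (max-x) % k divisibility check and (max-x) // k per element.
-- Note: Python A mutates its list argument in place; the equivalence proved here is
-- about the RETURN value only (B does not mutate).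

-- ===== PORT A =====
-- inner 'while arr[i] < max_elem: arr[i] += k; cnt += 1'; the '0 < k' conjunct is a
-- totality guard only: Python's while diverges when k ≤ 0 and v < m (excluded by Pre_)
def pvAWhile (m k v cnt : Int) : Int × Int :=
  if h : v < m ∧ 0 < k then pvAWhile m k (v + k) (cnt + 1) else (v, cnt)
  termination_by (m - v).toNat
  decreasing_by omega

-- the 'for i in range(len(arr))' loop over the elements (each index is read/written once)
def pvAFor (m k : Int) : List Int → Int → Int
  | [], cnt => cnt
  | x :: rest, cnt =>
    let p := pvAWhile m k x cnt
    if p.1 > m then -1 else pvAFor m k rest p.2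

def get_no_of_operation (arr : List Int) (k : Int) : Int :=
  match PySem.List.max? arr (fun y => y) with
  | none => -1   -- Python: max([]) raises ValueError; excluded by Pre_
  | some m => pvAFor m k arr 0

-- ===== PORT B =====
def pvBFor (m k : Int) : List Int → Int → Int
  | [], total => total
  | x :: rest, total =>
    let d := m - x
    if d = 0 then pvBFor m k rest total
    else if PySem.Int.mod d k ≠ 0 then -1
    else pvBFor m k rest (total + PySem.Int.floordiv d k)

def get_no_of_operation_alt (arr : List Int) (k : Int) : Int :=
  match PySem.List.max? arr (fun y => y) with
  | none => -1   -- Python: max([]) raises ValueError; excluded by Pre_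
  | some m => pvBFor m k arr 0

-- ===== PRECONDITION & SPEC =====
-- Pre_ excludes exactly the inputs where Python A does not return: arr = [] (max([])
-- raises ValueError) and k ≤ 0 with some element below the maximum (the while loop
-- never terminates); when all elements are equal the loop body never runs and A returns.
def Pre_get_no_of_operation (arr : List Int) (k : Int) : Prop :=
  arr ≠ [] ∧ (0 < k ∨ ∀ x ∈ arr, x = arr.headI)
instance (arr : List Int) (k : Int) : Decidable (Pre_get_no_of_operation arr k) := by
  unfold Pre_get_no_of_operation; infer_instance

def pvWitness_get_no_of_operation : List Int × Int := ([1, 3, 5], 2)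

def Spec_get_no_of_operation (arr : List Int) (k : Int) (out : Int) : Prop := out = get_no_of_operation_alt arr k
instance (arr : List Int) (k : Int) (out : Int) : Decidable (Spec_get_no_of_operation arr k out) := by unfold Spec_get_no_of_operation; infer_instance

-- ===== CLAIM (what is proved, stated in full; the proofs are below) =====
def Claim_equal_get_no_of_operation : Prop := ∀ (arr : List Int) (k : Int), Dom_get_no_of_operation arr k → Pre_get_no_of_operation arr k → Spec_get_no_of_operation arr k (get_no_of_operation arr k)

-- ===== LEMMAS AND PROOFS =====

-- the while loop started n = (m-x)/k steps below m lands exactly on m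
lemma pvAWhile_dvd_aux (m k : Int) (hk : 0 < k) :
    ∀ (n : Nat) (x cnt : Int), m - x = k * n → pvAWhile m k x cnt = (m, cnt + n) := by
  intro n
  induction n with
  | zero =>
    intro x cnt h
    rw [pvAWhile, dif_neg (by omega)]
    simp [show x = m from by omega]
  | succ n ih =>
    intro x cnt h
    have hn : 0 < ((n : Int) + 1) := by positivity
    have hlt : x < m := by push_cast at h; nlinarith
    rw [pvAWhile, dif_pos ⟨hlt, hk⟩]
    have h2 : m - (x + k) = k * n := by push_cast at h ⊢; linarith
    rw [ih (x + k) (cnt + 1) h2]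
    exact Prod.ext rfl (by push_cast; ring)

lemma pvAWhile_dvd (m k : Int) (hk : 0 < k) (x cnt : Int) (hx : x ≤ m) (hd : k ∣ (m - x)) :
    pvAWhile m k x cnt = (m, cnt + (m - x) / k) := by
  obtain ⟨c, hc⟩ := hd
  have hc0 : 0 ≤ c := by nlinarith
  have hdiv : (m - x) / k = c := by rw [hc, Int.mul_ediv_cancel_left _ (by omega)]
  rw [hdiv, pvAWhile_dvd_aux m k hk c.toNat x cnt (by rw [hc]; congr 1; omega)]
  congr 1; omega

-- with a non-divisible gap the while loop overshoots m
lemma pvAWhile_not_dvd_aux (m k : Int) (hk : 0 < k) :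
    ∀ (g : Nat) (x cnt : Int), (m - x).toNat ≤ g → x ≤ m → ¬ k ∣ (m - x) →
      (pvAWhile m k x cnt).1 > m := by
  intro g
  induction g with
  | zero =>
    intro x cnt hg hx hd
    exact absurd ⟨0, by omega⟩ hd
  | succ g ih =>
    intro x cnt hg hx hd
    have hne : x ≠ m := by rintro rfl; exact hd ⟨0, by ring⟩
    have hlt : x < m := lt_of_le_of_ne hx hne
    rw [pvAWhile, dif_pos ⟨hlt, hk⟩]
    by_cases h2 : x + k ≤ m
    · exact ih (x + k) (cnt + 1) (by omega)
        h2 (by rintro ⟨c, hc⟩; exact hd ⟨c + 1, by linarith⟩)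
    · have hne2 : x + k ≠ m := by rintro h; exact hd ⟨1, by omega⟩
      rw [pvAWhile, dif_neg (by omega)]
      show x + k > m
      omega

lemma pvAWhile_not_dvd (m k : Int) (hk : 0 < k) (x cnt : Int) (hx : x ≤ m)
    (hd : ¬ k ∣ (m - x)) : (pvAWhile m k x cnt).1 > m :=
  pvAWhile_not_dvd_aux m k hk (m - x).toNat x cnt (le_refl _) hx hd

-- A and B agree step for step when 0 < k and every element is ≤ m
lemma pvFor_eq_pos (m k : Int) (hk : 0 < k) :
    ∀ (l : List Int) (acc : Int), (∀ x ∈ l, x ≤ m) → pvAFor m k l acc = pvBFor m k l acc := by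
  intro l
  induction l with
  | nil => intro acc _; rfl
  | cons x rest ih =>
    intro acc hle
    have hx : x ≤ m := hle x (List.mem_cons_self ..)
    have ih' : ∀ a, pvAFor m k rest a = pvBFor m k rest a :=
      fun a => ih a (fun y hy => hle y (List.mem_cons_of_mem _ hy))
    by_cases hd : k ∣ (m - x)
    · have hA := pvAWhile_dvd m k hk x acc hx hd
      have hmod : PySem.Int.mod (m - x) k = 0 :=
        (PySem.Int.mod_eq_zero_iff_dvd _ _).mpr hd
      have hfd : PySem.Int.floordiv (m - x) k = (m - x) / k :=
        PySem.Int.floordiv_eq_ediv_of_pos hk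
      simp only [pvAFor, pvBFor, hA, gt_iff_lt, lt_irrefl, if_false]
      by_cases h0 : m - x = 0
      · rw [if_pos h0, show acc + (m - x) / k = acc from by rw [h0]; simp]
        exact ih' _
      · rw [if_neg h0, if_neg (by simp [hmod]), hfd]
        exact ih' _
    · have hA := pvAWhile_not_dvd m k hk x acc hx hd
      have hmod : PySem.Int.mod (m - x) k ≠ 0 := by
        rw [Ne, PySem.Int.mod_eq_zero_iff_dvd]; exact hd
      have h0 : m - x ≠ 0 := by rintro h; exact hd (by rw [h]; exact ⟨0, by ring⟩)
      simp only [pvAFor, pvBFor]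
      rw [if_pos hA, if_neg h0, if_pos hmod]

-- when every element already equals m the loops do nothing (covers k ≤ 0 under Pre_)
lemma pvFor_eq_const (m k : Int) :
    ∀ (l : List Int) (acc : Int), (∀ x ∈ l, x = m) → pvAFor m k l acc = pvBFor m k l acc := by
  intro l
  induction l with
  | nil => intro acc _; rfl
  | cons x rest ih =>
    intro acc heq
    have hx : x = m := heq x (List.mem_cons_self ..)
    simp only [pvAFor, pvBFor]
    rw [pvAWhile, dif_neg (by omega)]
    rw [if_neg (by omega), if_pos (by omega)]
    exact ih acc (fun y hy => heq y (List.mem_cons_of_mem _ hy))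

-- ===== VERDICT (by name: the statement is the Claim_ definition above) =====
theorem get_no_of_operation_spec : Claim_equal_get_no_of_operation := by
  intro arr k _ hpre
  obtain ⟨hne, hk⟩ := hpre
  unfold Spec_get_no_of_operation get_no_of_operation get_no_of_operation_alt
  cases hmax : PySem.List.max? arr (fun y => y) with
  | none => rfl
  | some m =>
    rcases hk with hk | hall
    · exact pvFor_eq_pos m k hk arr 0 (fun x hx => PySem.List.max?_isMax hmax x hx)
    · have hm : m ∈ arr := PySem.List.max?_mem hmax
      exact pvFor_eq_const m k arr 0
        (fun x hx => by rw [hall x hx, hall m hm])
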